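-- pv_equiv track=rewrite | github.com/981377660LMT/algorithm-study | 20_杂题/牛客编程巅峰赛/9_牛牛扔牌.py | Orderofpoker
-- ===== SOURCE A (Python) =====
-- def Orderofpoker(x):
--     def isPrime(x: int) -> bool:
--         """check a number if is a prime"""
--         if x <= 1:
--             return False
--         for num in range(2, int(x ** 0.5) + 1):
--             if x % num == 0:
--                 return False
--         return True
--
--     n = len(x)
--     res = []
--     while len(res) < n:
--         curLen = len(x)
--         if isPrime(curLen // 2):
--             res.append(x[:2])
--             x = x[2:]
--         else:
--             res.append(x[-2:])
--             x = x[:-2]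
--
--     return ''.join(res)
-- ===== SOURCE B (Python) =====
-- def Orderofpoker(x):
--     def is_prime(m):
--         if m < 2:
--             return False
--         i = 2
--         while i * i <= m:
--             if m % i == 0:
--                 return False
--             i += 1
--         return True
--
--     lo, hi = 0, len(x)
--     out = []
--     while lo < hi:
--         if is_prime((hi - lo) // 2):
--             out.append(x[lo:lo + 2])
--             lo = min(lo + 2, hi)
--         else:
--             out.append(x[max(hi - 2, lo):hi])
--             hi = max(hi - 2, lo)
--     return ''.join(out)
-- ===== Notes on version B (the rewrite author's own statement) =====
-- stated objective: faster
-- what changed: Two pointers into the original string replace repeated slicing/rebuilding of x (and the loop stops when the window is empty instead of padding with empty pieces); primality uses an i*i<=m trial loop instead of int(m**0.5).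
import Mathlib
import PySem

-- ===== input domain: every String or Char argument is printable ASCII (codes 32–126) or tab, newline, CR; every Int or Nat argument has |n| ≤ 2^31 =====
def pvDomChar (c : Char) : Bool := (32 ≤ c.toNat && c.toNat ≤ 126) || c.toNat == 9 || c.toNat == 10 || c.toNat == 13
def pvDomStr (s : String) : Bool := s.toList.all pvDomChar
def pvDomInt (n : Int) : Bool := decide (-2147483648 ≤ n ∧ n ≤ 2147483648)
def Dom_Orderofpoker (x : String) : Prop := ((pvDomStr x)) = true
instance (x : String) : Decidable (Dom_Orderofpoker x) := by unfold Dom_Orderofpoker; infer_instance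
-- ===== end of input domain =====

-- B replaces A's repeated string slicing by two pointers into the original string (faster); return value proved equal.

-- ===== PORT A =====
-- isPrime: `int(x ** 0.5)` ported as Nat.sqrt (exact for the lengths reachable here);
-- the for-loop with early `return False` is the short-circuit `all` over range(2, sqrt+1).
def aIsPrime (m : Nat) : Bool :=
  if m ≤ 1 then false
  else (List.range' 2 (Nat.sqrt m + 1 - 2)).all (fun d => m % d != 0)

-- the while-loop: res grows by one element per iteration, until len(res) = n; fuel n makes
-- the recursion structural (fuel never runs out before the guard fails, see Orderofpoker).
-- Python slices x[:2], x[2:], x[-2:], x[:-2] are exactly take/drop with Nat clamping.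
def aLoop : Nat → Nat → List Char → List String → List String
  | 0, _, _, res => res
  | fuel + 1, n, x, res =>
    if res.length < n then
      if aIsPrime (x.length / 2) then
        aLoop fuel n (x.drop 2) (res ++ [String.mk (x.take 2)])
      else
        aLoop fuel n (x.take (x.length - 2)) (res ++ [String.mk (x.drop (x.length - 2))])
    else res

def Orderofpoker (x : String) : String :=
  String.join (aLoop x.toList.length x.toList.length x.toList [])

-- ===== PORT B =====
-- while i * i <= m trial-division loop; fuel m suffices since the loop stops once i > sqrt m
def bIsPrimeLoop : Nat → Nat → Nat → Bool
  | 0, _, _ => true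
  | fuel + 1, m, i =>
    if i * i ≤ m then
      if m % i == 0 then false else bIsPrimeLoop fuel m (i + 1)
    else true

def bIsPrime (m : Nat) : Bool :=
  if m < 2 then false else bIsPrimeLoop m m 2

-- two-pointer loop over the original string; out is built piece by piece and joined;
-- fuel hi - lo suffices since the window shrinks each iteration
def bLoop : Nat → List Char → Nat → Nat → List String
  | 0, _, _, _ => []
  | fuel + 1, s, lo, hi =>
    if lo < hi then
      if bIsPrime ((hi - lo) / 2) then
        String.mk ((s.drop lo).take 2) :: bLoop fuel s (min (lo + 2) hi) hi
      else
        String.mk ((s.drop (max (hi - 2) lo)).take (hi - max (hi - 2) lo)) :: bLoop fuel s lo (max (hi - 2) lo)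
    else []

def Orderofpoker_alt (x : String) : String :=
  String.join (bLoop x.toList.length x.toList 0 x.toList.length)

-- ===== PRECONDITION & SPEC =====
def Spec_Orderofpoker (x : String) (out : String) : Prop := out = Orderofpoker_alt x
instance (x : String) (out : String) : Decidable (Spec_Orderofpoker x out) := by unfold Spec_Orderofpoker; infer_instance

-- ===== CLAIM (what is proved, stated in full; the proofs are below) =====
def Claim_equal_Orderofpoker : Prop := ∀ (x : String), Dom_Orderofpoker x → Spec_Orderofpoker x (Orderofpoker x)

-- ===== LEMMAS AND PROOFS =====

-- String.join bookkeeping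
theorem sfoldl_acc (l : List String) (a : String) :
    List.foldl (· ++ ·) a l = a ++ List.foldl (· ++ ·) "" l := by
  induction l generalizing a with
  | nil => simp
  | cons p t ih =>
    simp only [List.foldl_cons]
    rw [ih (a ++ p), ih ("" ++ p)]
    simp [String.append_assoc]

theorem sjoin_cons (p : String) (l : List String) :
    String.join (p :: l) = p ++ String.join l := by
  simp only [String.join, List.foldl_cons]
  rw [sfoldl_acc]
  simp

theorem sjoin_snoc (l : List String) (p : String) :
    String.join (l ++ [p]) = String.join l ++ p := by
  simp [String.join, List.foldl_append]

-- the two primality tests agree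
theorem primeLoop_eq (m : Nat) : ∀ f i, Nat.sqrt m + 1 - i ≤ f →
    bIsPrimeLoop f m i = (List.range' i (Nat.sqrt m + 1 - i)).all (fun d => m % d != 0) := by
  intro f
  induction f with
  | zero =>
    intro i hk
    have h0 : Nat.sqrt m + 1 - i = 0 := by omega
    rw [bIsPrimeLoop, h0]
    simp
  | succ f ih =>
    intro i hk
    by_cases h : i * i ≤ m
    · have hle : i ≤ Nat.sqrt m := Nat.le_sqrt.mpr h
      have hlen : Nat.sqrt m + 1 - i = (Nat.sqrt m + 1 - (i + 1)) + 1 := by omega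
      rw [bIsPrimeLoop, if_pos h, hlen, List.range'_succ]
      by_cases hd : m % i = 0
      · simp [hd]
      · simp only [List.all_cons]
        rw [ih (i + 1) (by omega)]
        simp [hd]
    · have h0 : Nat.sqrt m + 1 - i = 0 := by
        have : ¬ i ≤ Nat.sqrt m := fun hle => h (Nat.le_sqrt.mp hle)
        omega
      rw [bIsPrimeLoop, if_neg h, h0]
      simp

theorem prime_eq (m : Nat) : aIsPrime m = bIsPrime m := by
  unfold aIsPrime bIsPrime
  by_cases h : m ≤ 1
  · rw [if_pos h, if_pos (by omega)]
  · rw [if_neg h, if_neg (by omega), primeLoop_eq m m 2 (by have := Nat.sqrt_le_self m; omega)]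

theorem aIsPrime_two_le {m : Nat} (h : aIsPrime m = true) : 2 ≤ m := by
  by_contra hc
  unfold aIsPrime at h
  rw [if_pos (by omega)] at h
  exact Bool.false_ne_true h

theorem bLoop_stop (f : Nat) (s : List Char) (lo hi : Nat) (h : ¬ lo < hi) :
    bLoop f s lo hi = [] := by
  cases f with
  | zero => rw [bLoop]
  | succ f => rw [bLoop, if_neg h]

-- once x is empty, A only appends empty pieces; the join is unchanged
theorem aLoop_nil : ∀ fa k (res : List String), k ≤ fa + res.length →
    String.join (aLoop fa k [] res) = String.join res := by
  intro fa
  induction fa with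
  | zero =>
    intro k res _
    rw [aLoop]
  | succ fa ih =>
    intro k res h
    by_cases hlt : res.length < k
    · rw [aLoop, if_pos hlt]
      simp only [List.length_nil, List.take_nil, List.drop_nil]
      have hf : aIsPrime (0 / 2) = false := by decide
      rw [hf]
      simp only [Bool.false_eq_true, if_false]
      rw [ih k (res ++ [String.mk []]) (by simp; omega), sjoin_snoc]
      have hmk : String.mk ([] : List Char) = "" := rfl
      rw [hmk]
      simp
    · rw [aLoop, if_neg hlt]

-- main invariant: A's current x is the window s[lo:hi]
theorem main_loop (s : List Char) : ∀ fa lo hi (res : List String) k fb,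
    lo ≤ hi → hi ≤ s.length → k ≤ fa + res.length → hi - lo + res.length ≤ k → hi - lo ≤ fb →
    String.join (aLoop fa k ((s.drop lo).take (hi - lo)) res)
      = String.join res ++ String.join (bLoop fb s lo hi) := by
  intro fa
  induction fa with
  | zero =>
    intro lo hi res k fb h1 h2 h3 h4 h5
    have he : hi - lo = 0 := by omega
    rw [he]
    simp only [List.take_zero]
    rw [aLoop, bLoop_stop fb s lo hi (by omega)]
    simp [String.join]
  | succ fa ih =>
    intro lo hi res k fb h1 h2 h3 h4 h5
    by_cases hlt : lo < hi
    · obtain ⟨fb', rfl⟩ : ∃ fb', fb = fb' + 1 := ⟨fb - 1, by omega⟩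
      have hx : ((s.drop lo).take (hi - lo)).length = hi - lo := by
        simp [List.length_take, List.length_drop]; omega
      rw [aLoop, if_pos (by omega)]
      simp only [hx]
      rw [bLoop, if_pos hlt]
      by_cases hp : aIsPrime ((hi - lo) / 2) = true
      · have h4m : 4 ≤ hi - lo := by
          have := aIsPrime_two_le hp
          omega
        rw [if_pos hp, if_pos (by rw [← prime_eq]; exact hp)]
        have hmin : min (lo + 2) hi = lo + 2 := by omega
        have hpiece : ((s.drop lo).take (hi - lo)).take 2 = (s.drop lo).take 2 := by
          rw [List.take_take]; congr 1; omega
        have hrest : ((s.drop lo).take (hi - lo)).drop 2 = (s.drop (lo + 2)).take (hi - (lo + 2)) := by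
          rw [List.drop_take, List.drop_drop]
          congr 1
        rw [hpiece, hrest, hmin,
          ih (lo + 2) hi (res ++ [String.mk ((s.drop lo).take 2)]) k fb'
            (by omega) h2 (by simp; omega) (by simp; omega) (by omega)]
        rw [sjoin_snoc, sjoin_cons, String.append_assoc]
      · rw [if_neg hp, if_neg (by rw [← prime_eq]; exact hp)]
        by_cases h2m : 2 ≤ hi - lo
        · have hmax : max (hi - 2) lo = hi - 2 := by omega
          have hpiece : ((s.drop lo).take (hi - lo)).drop ((hi - lo) - 2)
              = (s.drop (max (hi - 2) lo)).take (hi - max (hi - 2) lo) := by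
            rw [List.drop_take, List.drop_drop, hmax]
            congr 1 <;> first | omega | (congr 1; omega)
          have hrest : ((s.drop lo).take (hi - lo)).take ((hi - lo) - 2) = (s.drop lo).take ((hi - 2) - lo) := by
            rw [List.take_take]; congr 1; omega
          rw [hpiece, hrest]
          have hih := ih lo (hi - 2) (res ++ [String.mk ((s.drop (max (hi - 2) lo)).take (hi - max (hi - 2) lo))]) k fb'
            (by omega) (by omega) (by simp; omega) (by simp; omega) (by omega)
          rw [hmax] at hih ⊢
          rw [hih, sjoin_snoc, sjoin_cons, String.append_assoc]
        · -- hi - lo = 1 : the last single character is taken from the back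
          have hm1 : hi - lo = 1 := by omega
          have hmax : max (hi - 2) lo = lo := by omega
          have hpiece : ((s.drop lo).take (hi - lo)).drop ((hi - lo) - 2)
              = (s.drop (max (hi - 2) lo)).take (hi - max (hi - 2) lo) := by
            rw [hm1, hmax]
            simp
            omega
          have hrest : ((s.drop lo).take (hi - lo)).take ((hi - lo) - 2) = [] := by
            rw [hm1]; simp
          rw [hpiece, hrest, hmax]
          rw [aLoop_nil fa k _ (by simp; omega)]
          rw [bLoop_stop fb' s lo lo (by omega), sjoin_snoc]
          simp [String.join]
    · have he : hi - lo = 0 := by omega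
      rw [he]
      simp only [List.take_zero]
      rw [aLoop_nil (fa + 1) k res (by omega), bLoop_stop fb s lo hi (by omega)]
      simp [String.join]

-- ===== VERDICT (by name: the statement is the Claim_ definition above) =====
theorem Orderofpoker_spec : Claim_equal_Orderofpoker := by
  intro x _
  unfold Spec_Orderofpoker Orderofpoker Orderofpoker_alt
  have h := main_loop x.toList x.toList.length 0 x.toList.length [] x.toList.length x.toList.length
    (by omega) (by omega) (by omega) (by simp) (by omega)
  simp only [List.drop_zero, Nat.sub_zero, List.take_length] at h
  rw [h]
  simp [String.join]
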